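-- pv_equiv track=rewrite | github.com/RaviduKarunathilaka/HIT137_Assignment_02_group_CAS-158 | question_02.py | string_convert
-- ===== SOURCE A (Python) =====
-- def string_convert(s):
--     #first convert string into numbers and letters
--     number_str = ''.join(char for char in s if char.isdigit())
--     letter_str = ''.join(char for char in s if char.isalpha())
--
--     #get the even number & even number ASCII value to lists
--     even_num = []
--     even_num_ascii = []
--     for num in number_str:
--         #check whether remainder is 0 to identify even or odd number
--         if int(num) % 2 == 0:
--             even_num.append(num)
--             even_num_ascii.append(ord(num))
--
--     #get the upper-case letters in the letter substring and get their ASCII value to the list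
--     upper_case_letter = []
--     upper_case_letters_ascii = []
--     for letter in letter_str:
--         # checking selected letter is uppercase letter
--         if letter.isupper():
--             upper_case_letter.append(letter)
--             upper_case_letters_ascii.append(ord(letter))
--
--     return number_str, letter_str,even_num, even_num_ascii,upper_case_letter, upper_case_letters_ascii
-- ===== SOURCE B (Python) =====
-- def string_convert(s):
--     # Single pass over s: classify each character once and grow all six results together.
--     number_chars = []
--     letter_chars = []
--     even_num = []
--     even_num_ascii = []
--     upper_case_letter = []
--     upper_case_letters_ascii = []
--     for char in s:
--         if char.isdigit():
--             number_chars.append(char)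
--             if int(char) % 2 == 0:
--                 even_num.append(char)
--                 even_num_ascii.append(ord(char))
--         elif char.isalpha():
--             letter_chars.append(char)
--             if char.isupper():
--                 upper_case_letter.append(char)
--                 upper_case_letters_ascii.append(ord(char))
--     return (''.join(number_chars), ''.join(letter_chars), even_num,
--             even_num_ascii, upper_case_letter, upper_case_letters_ascii)
-- ===== Notes on version B (the rewrite author's own statement) =====
-- stated objective: alternative
-- what changed: Replaces A's four separate traversals (two join-filters plus two follow-up loops over the extracted substrings) with one single pass over s that classifies each character once and builds all six results simultaneously.
import Mathlib
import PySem

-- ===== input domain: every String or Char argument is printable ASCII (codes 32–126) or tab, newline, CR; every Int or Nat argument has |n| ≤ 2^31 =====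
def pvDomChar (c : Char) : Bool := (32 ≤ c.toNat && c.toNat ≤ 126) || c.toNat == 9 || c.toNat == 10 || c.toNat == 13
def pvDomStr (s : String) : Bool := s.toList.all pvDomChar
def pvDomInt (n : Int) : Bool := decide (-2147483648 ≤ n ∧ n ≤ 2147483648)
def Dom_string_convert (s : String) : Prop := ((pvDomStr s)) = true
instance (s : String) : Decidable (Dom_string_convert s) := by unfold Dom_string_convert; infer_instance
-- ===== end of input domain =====

-- B is a single pass over s building all six results at once, instead of A's four traversals; equivalence is proved on all of Dom.

-- ===== PORT A =====
-- int(num) on a digit char: ported as (PySem.Int.ofChars? [c]).getD 0 — exact here since on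
-- Dom (ASCII) isdigit holds only for '0'..'9', where int() succeeds (ofChars? = some _).
def pvEvenDigit (c : Char) : Bool :=
  PySem.Int.mod ((PySem.Int.ofChars? [c]).getD 0) 2 == 0

def string_convert (s : String) : String × String × List String × List Int × List String × List Int :=
  let numberChars := s.toList.filter (fun c => PySem.Chars.isdigit c)
  let letterChars := s.toList.filter (fun c => PySem.Chars.isalpha c)
  let ev := numberChars.foldl
    (fun (acc : List String × List Int) num =>
      if pvEvenDigit num then (acc.1 ++ [String.mk [num]], acc.2 ++ [(num.toNat : Int)]) else acc)
    ([], [])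
  let up := letterChars.foldl
    (fun (acc : List String × List Int) letter =>
      if PySem.Chars.isupper letter then (acc.1 ++ [String.mk [letter]], acc.2 ++ [(letter.toNat : Int)]) else acc)
    ([], [])
  (String.mk numberChars, String.mk letterChars, ev.1, ev.2, up.1, up.2)

-- ===== PORT B =====
-- B's single loop, as structural recursion over the characters (head handled first, as the loop does).
def string_convert_alt_go (cs : List Char) :
    List Char × List Char × List String × List Int × List String × List Int :=
  match cs with
  | [] => ([], [], [], [], [], [])
  | c :: rest =>
    let r := string_convert_alt_go rest
    if PySem.Chars.isdigit c then
      if pvEvenDigit c then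
        (c :: r.1, r.2.1, String.mk [c] :: r.2.2.1, (c.toNat : Int) :: r.2.2.2.1, r.2.2.2.2.1, r.2.2.2.2.2)
      else
        (c :: r.1, r.2.1, r.2.2.1, r.2.2.2.1, r.2.2.2.2.1, r.2.2.2.2.2)
    else if PySem.Chars.isalpha c then
      if PySem.Chars.isupper c then
        (r.1, c :: r.2.1, r.2.2.1, r.2.2.2.1, String.mk [c] :: r.2.2.2.2.1, (c.toNat : Int) :: r.2.2.2.2.2)
      else
        (r.1, c :: r.2.1, r.2.2.1, r.2.2.2.1, r.2.2.2.2.1, r.2.2.2.2.2)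
    else r

def string_convert_alt (s : String) : String × String × List String × List Int × List String × List Int :=
  let r := string_convert_alt_go s.toList
  (String.mk r.1, String.mk r.2.1, r.2.2.1, r.2.2.2.1, r.2.2.2.2.1, r.2.2.2.2.2)

-- ===== PRECONDITION & SPEC =====
def Spec_string_convert (s : String) (out : String × String × List String × List Int × List String × List Int) : Prop := out = string_convert_alt s
instance (s : String) (out : String × String × List String × List Int × List String × List Int) : Decidable (Spec_string_convert s out) := by unfold Spec_string_convert; infer_instance

-- ===== CLAIM (what is proved, stated in full; the proofs are below) =====
def Claim_equal_string_convert : Prop := ∀ (s : String), Dom_string_convert s → Spec_string_convert s (string_convert s)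

-- ===== LEMMAS AND PROOFS =====

-- B's recursion computes the filters/maps that characterise A's four passes.
theorem string_convert_alt_go_eq (cs : List Char) :
    string_convert_alt_go cs =
      (cs.filter (fun c => PySem.Chars.isdigit c),
       cs.filter (fun c => !PySem.Chars.isdigit c && PySem.Chars.isalpha c),
       ((cs.filter (fun c => PySem.Chars.isdigit c)).filter pvEvenDigit).map (fun c => String.mk [c]),
       ((cs.filter (fun c => PySem.Chars.isdigit c)).filter pvEvenDigit).map (fun c => (c.toNat : Int)),
       ((cs.filter (fun c => !PySem.Chars.isdigit c && PySem.Chars.isalpha c)).filter PySem.Chars.isupper).map (fun c => String.mk [c]),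
       ((cs.filter (fun c => !PySem.Chars.isdigit c && PySem.Chars.isalpha c)).filter PySem.Chars.isupper).map (fun c => (c.toNat : Int))) := by
  induction cs with
  | nil => rfl
  | cons c rest ih =>
    simp only [string_convert_alt_go, ih, List.filter_cons]
    by_cases hd : PySem.Chars.isdigit c <;> by_cases ha : PySem.Chars.isalpha c <;>
      simp [hd, ha] <;> split <;> simp_all

-- A digit char is never alpha, so A's isalpha-filter agrees with B's elif-filter.
theorem filter_alpha_elif (cs : List Char) :
    cs.filter (fun c => PySem.Chars.isalpha c) =
      cs.filter (fun c => !PySem.Chars.isdigit c && PySem.Chars.isalpha c) := by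
  apply List.filter_congr
  intro c _
  have : ¬ (PySem.Chars.isdigit c = true ∧ PySem.Chars.isalpha c = true) := by
    simp only [PySem.Chars.isdigit, PySem.Chars.isalpha, PySem.Chars.isupper, PySem.Chars.islower,
      Char.le_def, UInt32.le_iff_toNat_le, Bool.and_eq_true, Bool.or_eq_true, decide_eq_true_eq]
    have h0 : '0'.val.toNat = 48 := rfl
    have h9 : '9'.val.toNat = 57 := rfl
    have hA : 'A'.val.toNat = 65 := rfl
    have hZ : 'Z'.val.toNat = 90 := rfl
    have ha : 'a'.val.toNat = 97 := rfl
    have hz : 'z'.val.toNat = 122 := rfl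
    omega
  cases hdig : PySem.Chars.isdigit c <;> cases halp : PySem.Chars.isalpha c <;> simp_all

-- ===== VERDICT (by name: the statement is the Claim_ definition above) =====
theorem string_convert_spec : Claim_equal_string_convert := by
  intro s hdom
  unfold Spec_string_convert string_convert string_convert_alt
  -- split A's shared-condition pair folds into independent folds, then name them
  rw [show (fun (acc : List String × List Int) num =>
        if pvEvenDigit num then (acc.1 ++ [String.mk [num]], acc.2 ++ [(num.toNat : Int)]) else acc)
      = (fun (acc : List String × List Int) num =>
        ((if pvEvenDigit num then acc.1 ++ [String.mk [num]] else acc.1),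
         (if pvEvenDigit num then acc.2 ++ [(num.toNat : Int)] else acc.2))) from by
        funext acc num; split <;> rfl,
     show (fun (acc : List String × List Int) letter =>
        if PySem.Chars.isupper letter then (acc.1 ++ [String.mk [letter]], acc.2 ++ [(letter.toNat : Int)]) else acc)
      = (fun (acc : List String × List Int) letter =>
        ((if PySem.Chars.isupper letter then acc.1 ++ [String.mk [letter]] else acc.1),
         (if PySem.Chars.isupper letter then acc.2 ++ [(letter.toNat : Int)] else acc.2))) from by
        funext acc letter; split <;> rfl]
  dsimp only
  rw [PySem.List.foldl_prod_mk (f := fun acc num => if pvEvenDigit num then acc ++ [String.mk [num]] else acc)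
        (g := fun acc num => if pvEvenDigit num then acc ++ [((num.toNat : Int))] else acc),
      PySem.List.foldl_prod_mk (f := fun acc letter => if PySem.Chars.isupper letter then acc ++ [String.mk [letter]] else acc)
        (g := fun acc letter => if PySem.Chars.isupper letter then acc ++ [((letter.toNat : Int))] else acc)]
  simp only [PySem.List.foldl_append_if, List.nil_append]
  rw [string_convert_alt_go_eq, filter_alpha_elif]
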